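-- pv_equiv track=rewrite | github.com/pypi-data/pypi-mirror-400 | packages/brkraw/brkraw-0.5.0rc1.tar.gz/brkraw-0.5.0rc1/scripts/update_contributors.py | _normalize_git_items
-- ===== SOURCE A (Python) =====
-- from typing import Dict, List, Optional
--
-- def _normalize_git_items(items: List[Dict[str, str]]) -> List[Dict[str, str]]:
--     seen: set[str] = set()
--     normalized: List[Dict[str, str]] = []
--     for item in sorted(items, key=lambda x: int(x.get("count", "0")), reverse=True):
--         login = (item.get("login") or "").strip()
--         name = (item.get("name") or "").strip()
--         key = login or name
--         if not key or key in seen: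
--             continue
--         seen.add(key)
--         normalized.append({"login": login, "name": name})
--     return normalized
-- ===== SOURCE B (Python) =====
-- def _normalize_git_items(items):
--     best = {}
--     for idx, item in enumerate(items):
--         count = int(item.get("count", "0"))
--         login = (item.get("login") or "").strip()
--         name = (item.get("name") or "").strip()
--         key = login or name
--         if not key:
--             continue
--         cur = best.get(key)
--         if cur is None or count > cur[0]:
--             best[key] = (count, idx, login, name)
--     reps = sorted(best.values(), key=lambda t: t[1])
--     reps.sort(key=lambda t: t[0], reverse=True)
--     return [{"login": login, "name": name} for _, _, login, name in reps]
-- ===== Notes on version B (the rewrite author's own statement) =====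
-- stated objective: alternative
-- what changed: A sorts the whole list by count and then dedups with a seen-set while emitting; B makes one pass over the original order building a dict of per-key best representatives (max count, earliest index on ties) and then sorts only the distinct representatives (by index, then stably by count descending).
import Mathlib
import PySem

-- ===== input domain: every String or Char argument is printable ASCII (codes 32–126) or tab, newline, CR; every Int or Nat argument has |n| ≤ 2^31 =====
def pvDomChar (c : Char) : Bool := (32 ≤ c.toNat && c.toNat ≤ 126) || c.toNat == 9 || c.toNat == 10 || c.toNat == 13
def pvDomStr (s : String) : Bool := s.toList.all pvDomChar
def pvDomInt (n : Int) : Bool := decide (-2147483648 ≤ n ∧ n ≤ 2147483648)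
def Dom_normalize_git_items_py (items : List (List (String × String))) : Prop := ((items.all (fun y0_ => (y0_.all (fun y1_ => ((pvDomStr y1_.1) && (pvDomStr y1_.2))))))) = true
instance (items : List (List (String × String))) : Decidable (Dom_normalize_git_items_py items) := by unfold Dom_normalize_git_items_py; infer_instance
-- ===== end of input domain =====

-- B replaces A's sort-everything-then-set-dedup by a one-pass dict of per-key best
-- representatives followed by sorting only the distinct representatives (objective: alternative).
-- Pre_ marks where Python's int() raises; both programs raise there identically.


-- shared models of Python expressions appearing in BOTH sources
-- item.get(k, dflt) on an association-list dict
def pvGet (item : List (String × String)) (k dflt : String) : String :=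
  (PySem.Dict.mk item).getD k dflt
-- int(item.get("count", "0")); total via getD 0, exact on Pre_ (where int() does not raise)
def pvCount (item : List (String × String)) : Int :=
  (PySem.Int.ofStr? (pvGet item "count" "0")).getD 0
-- (item.get("login") or "").strip()   /   (item.get("name") or "").strip()
def pvLogin (item : List (String × String)) : String := PySem.Str.strip (pvGet item "login" "")
def pvName (item : List (String × String)) : String := PySem.Str.strip (pvGet item "name" "")

-- ===== PORT A =====
def normalize_git_items_py (items : List (List (String × String))) : List (List (String × String)) :=
  ((PySem.List.sorted items (fun x => pvCount x) true).foldl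
    (fun (st : PySem.Set String × List (List (String × String))) item =>
      let login := pvLogin item
      let name := pvName item
      let key := if login = "" then name else login
      if key = "" ∨ PySem.Set.contains st.1 key = true then st
      else (PySem.Set.add st.1 key, st.2 ++ [[("login", login), ("name", name)]]))
    (PySem.Set.empty, [])).2

-- ===== PORT B =====
def normalize_git_items_py_alt (items : List (List (String × String))) : List (List (String × String)) :=
  let best : PySem.Dict String (Int × Int × String × String) :=
    (PySem.List.enumerate items 0).foldl
      (fun best p =>
        let count := pvCount p.2
        let login := pvLogin p.2
        let name := pvName p.2
        let key := if login = "" then name else login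
        if key = "" then best
        else
          match best.get? key with
          | none => best.insert key (count, p.1, login, name)
          | some cur => if cur.1 < count then best.insert key (count, p.1, login, name) else best)
      PySem.Dict.empty
  let reps1 := PySem.List.sorted best.values (fun t => t.2.1) false
  let reps2 := PySem.List.sorted reps1 (fun t => t.1) true
  reps2.map (fun t => [("login", t.2.2.1), ("name", t.2.2.2)])

-- ===== PRECONDITION & SPEC =====
-- Pre_ excludes exactly the inputs where Python's int() raises ValueError on some item's "count" (both A and B raise there).
def Pre_normalize_git_items_py (items : List (List (String × String))) : Prop :=
  ∀ item ∈ items, (PySem.Int.ofStr? (pvGet item "count" "0")).isSome = true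
instance (items : List (List (String × String))) : Decidable (Pre_normalize_git_items_py items) := by
  unfold Pre_normalize_git_items_py; infer_instance

def pvWitness_normalize_git_items_py : (List (List (String × String))) :=
  [[("login", "alice"), ("count", "2")], [("name", "bob")], [("login", "alice"), ("count", "9")]]

def Spec_normalize_git_items_py (items : List (List (String × String))) (out : List (List (String × String))) : Prop := out = normalize_git_items_py_alt items
instance (items : List (List (String × String))) (out : List (List (String × String))) : Decidable (Spec_normalize_git_items_py items out) := by unfold Spec_normalize_git_items_py; infer_instance

-- ===== CLAIM (what is proved, stated in full; the proofs are below) =====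
def Claim_equal_normalize_git_items_py : Prop := ∀ (items : List (List (String × String))), Dom_normalize_git_items_py items → Pre_normalize_git_items_py items → Spec_normalize_git_items_py items (normalize_git_items_py items)

-- ===== LEMMAS AND PROOFS =====

-- the key "login or name" of an item
def pvKey (item : List (String × String)) : String :=
  if pvLogin item = "" then pvName item else pvLogin item
-- the emitted dict for an item
def pvOut (item : List (String × String)) : List (String × String) :=
  [("login", pvLogin item), ("name", pvName item)]

def pvSR {α : Type} (key aux : α → Int) (a b : α) : Prop :=
  key b < key a ∨ (key a = key b ∧ aux a < aux b)

theorem pv_insertBy_pairwise {α : Type} (key aux : α → Int) (x : α) (l : List α)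
    (hl : l.Pairwise (pvSR key aux)) (hx : ∀ y ∈ l, aux y < aux x) :
    (PySem.List.insertBy (fun a b => decide (key b < key a)) x l).Pairwise (pvSR key aux) := by
  induction l with
  | nil => simp [PySem.List.insertBy]
  | cons y ys ih =>
    rw [List.pairwise_cons] at hl
    by_cases h : key y < key x
    · have he : PySem.List.insertBy (fun a b => decide (key b < key a)) x (y :: ys) = x :: y :: ys := by
        simp [PySem.List.insertBy, h]
      rw [he, List.pairwise_cons]
      refine ⟨?_, List.pairwise_cons.mpr hl⟩
      intro z hz
      rcases List.mem_cons.mp hz with rfl | hz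
      · exact Or.inl h
      · rcases hl.1 z hz with h2 | ⟨h2, _⟩
        · exact Or.inl (by omega)
        · exact Or.inl (by omega)
    · have he : PySem.List.insertBy (fun a b => decide (key b < key a)) x (y :: ys) =
          y :: PySem.List.insertBy (fun a b => decide (key b < key a)) x ys := by
        simp [PySem.List.insertBy, h]
      rw [he, List.pairwise_cons]
      constructor
      · intro z hz
        rcases (PySem.List.mem_insertBy _ x z ys).mp hz with rfl | hz
        · rcases lt_or_eq_of_le (not_lt.mp h) with h2 | h2
          · exact Or.inl h2
          · exact Or.inr ⟨h2.symm, hx y (List.mem_cons_self)⟩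
        · exact hl.1 z hz
      · exact ih hl.2 (fun z hz => hx z (List.mem_cons_of_mem _ hz))

theorem pv_foldl_insertBy_pairwise {α : Type} (key aux : α → Int) :
    ∀ (xs acc : List α), acc.Pairwise (pvSR key aux) →
      (∀ y ∈ acc, ∀ x ∈ xs, aux y < aux x) →
      xs.Pairwise (fun a b => aux a < aux b) →
      (xs.foldl (fun acc x => PySem.List.insertBy (fun a b => decide (key b < key a)) x acc) acc).Pairwise (pvSR key aux)
  | [], acc, hacc, _, _ => hacc
  | x :: xs, acc, hacc, hcross, hxs => by
    rw [List.foldl_cons]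
    rw [List.pairwise_cons] at hxs
    refine pv_foldl_insertBy_pairwise key aux xs _ ?_ ?_ hxs.2
    · exact pv_insertBy_pairwise key aux x acc hacc (fun y hy => hcross y hy x List.mem_cons_self)
    · intro y hy z hz
      rcases (PySem.List.mem_insertBy _ x y acc).mp hy with rfl | hy
      · exact hxs.1 z hz
      · exact hcross y hy z (List.mem_cons_of_mem _ hz)

theorem pv_sorted_rev_pairwise {α : Type} (key aux : α → Int) (xs : List α)
    (hxs : xs.Pairwise (fun a b => aux a < aux b)) :
    (PySem.List.sorted xs key true).Pairwise (pvSR key aux) := by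
  rw [PySem.List.sorted_rev_eq_foldl_insertBy]
  exact pv_foldl_insertBy_pairwise key aux xs [] (by simp) (by simp) hxs

theorem pv_eq_of_perm_pairwise {α : Type} (key aux : α → Int) (l1 l2 : List α)
    (hp : l1.Perm l2) (h1 : l1.Pairwise (pvSR key aux)) (h2 : l2.Pairwise (pvSR key aux)) :
    l1 = l2 := by
  refine List.Perm.eq_of_pairwise ?_ h1 h2 hp
  intro a b _ _ hab hba
  exfalso
  rcases hab with h | ⟨h, h'⟩ <;> rcases hba with g | ⟨g, g'⟩ <;> omega

theorem pv_insertBy_map {α β : Type} (f : α → β) (bef : β → β → Bool) (x : α) (l : List α) :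
    PySem.List.insertBy bef (f x) (l.map f) =
      (PySem.List.insertBy (fun a b => bef (f a) (f b)) x l).map f := by
  induction l with
  | nil => simp [PySem.List.insertBy]
  | cons y ys ih => by_cases h : bef (f x) (f y) <;> simp [PySem.List.insertBy, h, ih]

theorem pv_foldl_insertBy_map {α β : Type} (f : α → β) (bef : β → β → Bool) :
    ∀ (xs : List α) (acc : List α),
      (xs.map f).foldl (fun acc x => PySem.List.insertBy bef x acc) (acc.map f) =
        (xs.foldl (fun acc x => PySem.List.insertBy (fun a b => bef (f a) (f b)) x acc) acc).map f
  | [], acc => rfl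
  | x :: xs, acc => by
    rw [List.map_cons, List.foldl_cons, List.foldl_cons, pv_insertBy_map]
    exact pv_foldl_insertBy_map f bef xs _

theorem pv_sorted_map {α β : Type} (f : α → β) (key : β → Int) (xs : List α) :
    PySem.List.sorted (xs.map f) key true =
      (PySem.List.sorted xs (fun a => key (f a)) true).map f := by
  rw [PySem.List.sorted_rev_eq_foldl_insertBy, PySem.List.sorted_rev_eq_foldl_insertBy]
  simpa using pv_foldl_insertBy_map f (fun a b => decide (key b < key a)) xs []

-- A's loop body
def pvStepA (st : PySem.Set String × List (List (String × String))) (item : List (String × String)) :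
    PySem.Set String × List (List (String × String)) :=
  let login := pvLogin item
  let name := pvName item
  let key := if login = "" then name else login
  if key = "" ∨ PySem.Set.contains st.1 key = true then st
  else (PySem.Set.add st.1 key, st.2 ++ [[("login", login), ("name", name)]])

def pvSel : List (List (String × String)) → PySem.Set String → List (List (String × String))
  | [], _ => []
  | x :: xs, seen =>
    if pvKey x = "" ∨ PySem.Set.contains seen (pvKey x) = true then pvSel xs seen
    else x :: pvSel xs (PySem.Set.add seen (pvKey x))

theorem pv_foldA : ∀ (xs : List (List (String × String))) (seen : PySem.Set String)
    (acc : List (List (String × String))),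
    (xs.foldl pvStepA (seen, acc)).2 = acc ++ (pvSel xs seen).map pvOut
  | [], seen, acc => by simp [pvSel]
  | x :: xs, seen, acc => by
    rw [List.foldl_cons]
    by_cases h : pvKey x = "" ∨ pvKey x ∈ seen
    · have hs : pvStepA (seen, acc) x = (seen, acc) := by
        simp only [pvStepA]
        simp only [pvKey] at h
        simp [h]
      rw [hs, pv_foldA xs seen acc, pvSel]
      simp [h]
    · have hs : pvStepA (seen, acc) x = (PySem.Set.add seen (pvKey x), acc ++ [pvOut x]) := by
        simp only [pvStepA, pvOut]
        simp only [pvKey] at h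
        simp [h, pvKey]
      rw [hs, pv_foldA xs _ _, pvSel]
      simp [h]

-- pairs
def pvC (p : Int × List (String × String)) : Int := pvCount p.2
def pvI (p : Int × List (String × String)) : Int := p.1
def pvEmb (p : Int × List (String × String)) : Int × Int × String × String :=
  (pvCount p.2, p.1, pvLogin p.2, pvName p.2)

def pvSelP : List (Int × List (String × String)) → PySem.Set String → List (Int × List (String × String))
  | [], _ => []
  | x :: xs, seen =>
    if pvKey x.2 = "" ∨ PySem.Set.contains seen (pvKey x.2) = true then pvSelP xs seen
    else x :: pvSelP xs (PySem.Set.add seen (pvKey x.2))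

theorem pv_sel_map : ∀ (l : List (Int × List (String × String))) (seen : PySem.Set String),
    pvSel (l.map (fun p => p.2)) seen = (pvSelP l seen).map (fun p => p.2)
  | [], _ => rfl
  | x :: xs, seen => by
    rw [List.map_cons, pvSel, pvSelP]
    by_cases h : pvKey x.2 = "" ∨ pvKey x.2 ∈ seen
    · simp [h, pv_sel_map xs seen]
    · simp [h, pv_sel_map xs (PySem.Set.add seen (pvKey x.2))]

theorem pv_selP_sublist : ∀ (l : List (Int × List (String × String))) (seen : PySem.Set String),
    (pvSelP l seen).Sublist l
  | [], _ => by simp [pvSelP]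
  | x :: xs, seen => by
    rw [pvSelP]
    split
    · exact (pv_selP_sublist xs seen).trans (List.sublist_cons_self x xs)
    · exact (pv_selP_sublist xs _).cons₂ x

theorem pv_selP_mem : ∀ (l : List (Int × List (String × String))) (seen : PySem.Set String)
    (p : Int × List (String × String)),
    l.Pairwise (pvSR pvC pvI) →
    (p ∈ pvSelP l seen ↔
      p ∈ l ∧ pvKey p.2 ≠ "" ∧ pvKey p.2 ∉ seen ∧
        ∀ q ∈ l, pvKey q.2 = pvKey p.2 → q = p ∨ pvSR pvC pvI p q)
  | [], seen, p, _ => by simp [pvSelP]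
  | x :: xs, seen, p, hpw => by
    rw [List.pairwise_cons] at hpw
    rw [pvSelP]
    by_cases h : pvKey x.2 = "" ∨ pvKey x.2 ∈ seen
    · rw [if_pos (by simpa using h)]
      rw [pv_selP_mem xs seen p hpw.2]
      constructor
      · rintro ⟨hmem, hne, hns, hall⟩
        refine ⟨List.mem_cons_of_mem _ hmem, hne, hns, ?_⟩
        intro q hq hkq
        rcases List.mem_cons.mp hq with rfl | hq
        · rcases h with h | h
          · exact absurd (hkq ▸ h) hne
          · exact absurd (hkq ▸ h) hns
        · exact hall q hq hkq
      · rintro ⟨hmem, hne, hns, hall⟩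
        have hpx : p ≠ x := by
          rintro rfl
          rcases h with h | h
          · exact hne h
          · exact hns h
        rcases List.mem_cons.mp hmem with rfl | hmem
        · exact absurd rfl hpx
        · exact ⟨hmem, hne, hns, fun q hq hkq => hall q (List.mem_cons_of_mem _ hq) hkq⟩
    · rw [if_neg (by simpa using h)]
      rw [not_or] at h
      constructor
      · intro hp
        rcases List.mem_cons.mp hp with rfl | hp
        · refine ⟨List.mem_cons_self, h.1, h.2, ?_⟩
          intro q hq hkq
          rcases List.mem_cons.mp hq with rfl | hq
          · exact Or.inl rfl
          · exact Or.inr (hpw.1 q hq)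
        · have := (pv_selP_mem xs (PySem.Set.add seen (pvKey x.2)) p hpw.2).mp hp
          rcases this with ⟨hmem, hne, hns, hall⟩
          have hkx : pvKey p.2 ≠ pvKey x.2 := by
            intro he
            exact hns ((PySem.Set.mem_add seen (pvKey x.2) (pvKey p.2)).mpr (Or.inr he))
          refine ⟨List.mem_cons_of_mem _ hmem, hne, ?_, ?_⟩
          · intro hin
            exact hns ((PySem.Set.mem_add seen (pvKey x.2) (pvKey p.2)).mpr (Or.inl hin))
          · intro q hq hkq
            rcases List.mem_cons.mp hq with rfl | hq
            · exact absurd hkq.symm hkx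
            · exact hall q hq hkq
      · rintro ⟨hmem, hne, hns, hall⟩
        by_cases hpx : p = x
        · subst hpx; exact List.mem_cons_self
        · have hp : p ∈ xs := by
            rcases List.mem_cons.mp hmem with h' | h'
            · exact absurd h' hpx
            · exact h'
          have hkx : pvKey x.2 ≠ pvKey p.2 := by
            intro he
            rcases hall x List.mem_cons_self he with h' | h'
            · exact hpx h'.symm
            · have h2 := hpw.1 p hp
              rcases h' with h' | ⟨h', h''⟩ <;> rcases h2 with h2 | ⟨h2, h2'⟩ <;>
                simp only [pvC, pvI] at * <;> omega
          refine List.mem_cons_of_mem _ ?_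
          refine (pv_selP_mem xs (PySem.Set.add seen (pvKey x.2)) p hpw.2).mpr ?_
          refine ⟨hp, hne, ?_, fun q hq hkq => hall q (List.mem_cons_of_mem _ hq) hkq⟩
          intro hin
          rcases (PySem.Set.mem_add seen (pvKey x.2) (pvKey p.2)).mp hin with h' | h'
          · exact hns h'
          · exact hkx h'.symm

def pvUpd (o : Option (Int × Int × String × String)) (p : Int × List (String × String)) :
    Option (Int × Int × String × String) :=
  match o with
  | none => some (pvEmb p)
  | some c => if c.1 < pvCount p.2 then some (pvEmb p) else some c

-- B's loop body
def pvBStep (best : PySem.Dict String (Int × Int × String × String))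
    (p : Int × List (String × String)) : PySem.Dict String (Int × Int × String × String) :=
  let count := pvCount p.2
  let login := pvLogin p.2
  let name := pvName p.2
  let key := if login = "" then name else login
  if key = "" then best
  else
    match best.get? key with
    | none => best.insert key (count, p.1, login, name)
    | some cur => if cur.1 < count then best.insert key (count, p.1, login, name) else best

theorem pv_bstep_get? (d : PySem.Dict String (Int × Int × String × String))
    (p : Int × List (String × String)) (k : String) (hk : k ≠ "") :
    (pvBStep d p).get? k = if pvKey p.2 = k then pvUpd (d.get? k) p else d.get? k := by
  show (if pvKey p.2 = "" then d
    else match d.get? (pvKey p.2) with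
      | none => d.insert (pvKey p.2) (pvEmb p)
      | some cur => if cur.1 < pvCount p.2 then d.insert (pvKey p.2) (pvEmb p) else d).get? k = _
  by_cases h0 : pvKey p.2 = ""
  · rw [if_pos h0, if_neg (by rw [h0]; exact fun he => hk he.symm)]
  · rw [if_neg h0]
    rcases hd : d.get? (pvKey p.2) with _ | cur
    · show (d.insert (pvKey p.2) (pvEmb p)).get? k = _
      by_cases hpk : pvKey p.2 = k
      · subst hpk
        rw [PySem.Dict.get?_insert, if_pos rfl, if_pos rfl, hd]
        rfl
      · rw [PySem.Dict.get?_insert, if_neg (fun he => hpk he.symm), if_neg hpk]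
    · show (if cur.1 < pvCount p.2 then d.insert (pvKey p.2) (pvEmb p) else d).get? k = _
      by_cases hpk : pvKey p.2 = k
      · subst hpk
        rw [if_pos rfl, hd]
        by_cases hc : cur.1 < pvCount p.2
        · rw [if_pos hc, PySem.Dict.get?_insert, if_pos rfl]
          simp [pvUpd, hc]
        · rw [if_neg hc]
          simp [pvUpd, hc, hd]
      · rw [if_neg hpk]
        by_cases hc : cur.1 < pvCount p.2
        · rw [if_pos hc, PySem.Dict.get?_insert, if_neg (fun he => hpk he.symm)]
        · rw [if_neg hc]

theorem pv_bstep_get?_empty (d : PySem.Dict String (Int × Int × String × String))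
    (p : Int × List (String × String)) :
    (pvBStep d p).get? "" = d.get? "" := by
  show (if pvKey p.2 = "" then d
    else match d.get? (pvKey p.2) with
      | none => d.insert (pvKey p.2) (pvEmb p)
      | some cur => if cur.1 < pvCount p.2 then d.insert (pvKey p.2) (pvEmb p) else d).get? "" = _
  by_cases h0 : pvKey p.2 = ""
  · rw [if_pos h0]
  · rw [if_neg h0]
    rcases hd : d.get? (pvKey p.2) with _ | cur
    · show (d.insert (pvKey p.2) (pvEmb p)).get? "" = _
      rw [PySem.Dict.get?_insert, if_neg (fun he => h0 he.symm)]
    · show (if cur.1 < pvCount p.2 then d.insert (pvKey p.2) (pvEmb p) else d).get? "" = _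
      by_cases hc : cur.1 < pvCount p.2
      · rw [if_pos hc, PySem.Dict.get?_insert, if_neg (fun he => h0 he.symm)]
      · rw [if_neg hc]

theorem pv_foldl_get? : ∀ (l : List (Int × List (String × String)))
    (d : PySem.Dict String (Int × Int × String × String)) (k : String), k ≠ "" →
    (l.foldl pvBStep d).get? k =
      l.foldl (fun o p => if pvKey p.2 = k then pvUpd o p else o) (d.get? k)
  | [], _, _, _ => rfl
  | p :: l, d, k, hk => by
    rw [List.foldl_cons, List.foldl_cons, pv_foldl_get? l _ k hk, pv_bstep_get? d p k hk]

theorem pv_foldl_get?_empty : ∀ (l : List (Int × List (String × String)))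
    (d : PySem.Dict String (Int × Int × String × String)),
    (l.foldl pvBStep d).get? "" = d.get? ""
  | [], _ => rfl
  | p :: l, d => by
    rw [List.foldl_cons, pv_foldl_get?_empty l _, pv_bstep_get?_empty d p]

theorem pv_bstep_nodup (d : PySem.Dict String (Int × Int × String × String))
    (p : Int × List (String × String)) (hd : d.keys.Nodup) : (pvBStep d p).keys.Nodup := by
  show (if pvKey p.2 = "" then d
    else match d.get? (pvKey p.2) with
      | none => d.insert (pvKey p.2) (pvEmb p)
      | some cur => if cur.1 < pvCount p.2 then d.insert (pvKey p.2) (pvEmb p) else d).keys.Nodup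
  by_cases h0 : pvKey p.2 = ""
  · rwa [if_pos h0]
  · rw [if_neg h0]
    rcases hg : d.get? (pvKey p.2) with _ | cur
    · exact PySem.Dict.nodup_keys_insert d _ _ hd
    · show (if cur.1 < pvCount p.2 then d.insert (pvKey p.2) (pvEmb p) else d).keys.Nodup
      by_cases hc : cur.1 < pvCount p.2
      · rw [if_pos hc]
        exact PySem.Dict.nodup_keys_insert d _ _ hd
      · rwa [if_neg hc]

theorem pv_foldl_nodup : ∀ (l : List (Int × List (String × String)))
    (d : PySem.Dict String (Int × Int × String × String)), d.keys.Nodup →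
    (l.foldl pvBStep d).keys.Nodup
  | [], _, hd => hd
  | p :: l, d, hd => by
    rw [List.foldl_cons]
    exact pv_foldl_nodup l _ (pv_bstep_nodup d p hd)

def pvIsRep (l : List (Int × List (String × String))) (k : String)
    (p : Int × List (String × String)) : Prop :=
  p ∈ l ∧ pvKey p.2 = k ∧ ∀ q ∈ l, pvKey q.2 = k → q = p ∨ pvSR pvC pvI p q

theorem pv_selRep_spec : ∀ (l pre : List (Int × List (String × String)))
    (o : Option (Int × Int × String × String)) (k : String),
    (pre ++ l).Pairwise (fun p q => p.1 < q.1) →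
    ((o = none ∧ ∀ p ∈ pre, pvKey p.2 ≠ k) ∨ ∃ p, pvIsRep pre k p ∧ o = some (pvEmb p)) →
    ((l.foldl (fun o p => if pvKey p.2 = k then pvUpd o p else o) o = none ∧
        ∀ p ∈ pre ++ l, pvKey p.2 ≠ k) ∨
      ∃ p, pvIsRep (pre ++ l) k p ∧
        l.foldl (fun o p => if pvKey p.2 = k then pvUpd o p else o) o = some (pvEmb p))
  | [], pre, o, k, _, hinv => by simpa using hinv
  | q :: l, pre, o, k, hpw, hinv => by
    have hre : pre ++ q :: l = (pre ++ [q]) ++ l := by simp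
    rw [List.foldl_cons, hre]
    refine pv_selRep_spec l (pre ++ [q]) _ k (by rw [← hre]; exact hpw) ?_
    have hcross : ∀ r ∈ pre, r.1 < q.1 := by
      intro r hr
      exact (List.pairwise_append.mp hpw).2.2 r hr q List.mem_cons_self
    by_cases hqk : pvKey q.2 = k
    · rw [if_pos hqk]
      rcases hinv with ⟨rfl, hnone⟩ | ⟨p, hrep, rfl⟩
      · right
        refine ⟨q, ⟨List.mem_append_right _ List.mem_cons_self, hqk, ?_⟩, rfl⟩
        intro r hr hrk
        rcases List.mem_append.mp hr with hr | hr
        · exact absurd hrk (hnone r hr)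
        · rcases List.mem_singleton.mp hr with rfl
          exact Or.inl rfl
      · have hIq : p.1 < q.1 := hcross p hrep.1
        by_cases hc : pvCount p.2 < pvCount q.2
        · have : pvUpd (some (pvEmb p)) q = some (pvEmb q) := by simp [pvUpd, pvEmb, hc]
          rw [this]
          right
          refine ⟨q, ⟨List.mem_append_right _ List.mem_cons_self, hqk, ?_⟩, rfl⟩
          intro r hr hrk
          rcases List.mem_append.mp hr with hr | hr
          · rcases hrep.2.2 r hr hrk with rfl | hsr
            · exact Or.inr (Or.inl hc)
            · refine Or.inr ?_
              rcases hsr with h' | ⟨h', h''⟩ <;> simp only [pvSR, pvC, pvI] at * <;> omega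
          · rcases List.mem_singleton.mp hr with rfl
            exact Or.inl rfl
        · have : pvUpd (some (pvEmb p)) q = some (pvEmb p) := by simp [pvUpd, pvEmb, hc]
          rw [this]
          right
          refine ⟨p, ⟨List.mem_append_left _ hrep.1, hrep.2.1, ?_⟩, rfl⟩
          intro r hr hrk
          rcases List.mem_append.mp hr with hr | hr
          · exact hrep.2.2 r hr hrk
          · rcases List.mem_singleton.mp hr with rfl
            refine Or.inr ?_
            simp only [pvSR, pvC, pvI] at *
            omega
    · rw [if_neg hqk]
      rcases hinv with ⟨rfl, hnone⟩ | ⟨p, hrep, rfl⟩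
      · left
        refine ⟨rfl, ?_⟩
        intro r hr
        rcases List.mem_append.mp hr with hr | hr
        · exact hnone r hr
        · rcases List.mem_singleton.mp hr with rfl
          exact hqk
      · right
        refine ⟨p, ⟨List.mem_append_left _ hrep.1, hrep.2.1, ?_⟩, rfl⟩
        intro r hr hrk
        rcases List.mem_append.mp hr with hr | hr
        · exact hrep.2.2 r hr hrk
        · rcases List.mem_singleton.mp hr with rfl
          exact absurd hrk hqk

theorem pv_isRep_unique (l : List (Int × List (String × String))) (k : String)
    (p p' : Int × List (String × String)) (h : pvIsRep l k p) (h' : pvIsRep l k p') : p = p' := by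
  rcases h.2.2 p' h'.1 h'.2.1 with h1 | h1
  · exact h1.symm
  rcases h'.2.2 p h.1 h.2.1 with h2 | h2
  · exact h2
  exfalso
  rcases h1 with h1 | ⟨h1, h1'⟩ <;> rcases h2 with h2 | ⟨h2, h2'⟩ <;>
    simp only [pvC, pvI] at * <;> omega

theorem pv_mem_values {d : PySem.Dict String (Int × Int × String × String)}
    (hnd : d.keys.Nodup) (v : Int × Int × String × String) :
    v ∈ d.values ↔ ∃ k, d.get? k = some v := by
  show v ∈ d.items.map (fun kv => kv.2) ↔ _
  constructor
  · intro hv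
    rcases List.mem_map.mp hv with ⟨kv, hkv, rfl⟩
    exact ⟨kv.1, (PySem.Dict.get?_eq_some_iff_mem_items d kv.1 kv.2 hnd).mpr (by simpa using hkv)⟩
  · rintro ⟨k, hk⟩
    exact List.mem_map.mpr ⟨(k, v), PySem.Dict.mem_items_of_get?_eq_some d hk, rfl⟩

theorem pv_main (items : List (List (String × String))) :
    normalize_git_items_py items = normalize_git_items_py_alt items := by
  set e := PySem.List.enumerate items 0 with he
  set s := PySem.List.sorted e pvC true with hs
  set sel := pvSelP s PySem.Set.empty with hseldef
  set bestd := e.foldl pvBStep PySem.Dict.empty with hbest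
  -- basic facts
  have hpe : e.Pairwise (fun p q => p.1 < q.1) := PySem.List.pairwise_lt_enumerate items 0
  have hsperm : s.Perm e := PySem.List.sorted_perm e pvC true
  have hspw : s.Pairwise (pvSR pvC pvI) := pv_sorted_rev_pairwise pvC pvI e hpe
  have hsel_sub : sel.Sublist s := pv_selP_sublist s PySem.Set.empty
  have hsel_pw : sel.Pairwise (pvSR pvC pvI) := hspw.sublist hsel_sub
  have hefst : (e.map (fun p => p.1)).Nodup :=
    (List.pairwise_map.mpr hpe).imp (fun h => ne_of_lt h)
  have hsfst : (s.map (fun p => p.1)).Nodup := ((hsperm.map _).nodup_iff).mpr hefst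
  have hselfst : (sel.map (fun p => p.1)).Nodup := (hsel_sub.map _).nodup hsfst
  have hfst_inj : ∀ p ∈ e, ∀ p' ∈ e, p.1 = p'.1 → p = p' := by
    intro p hp p' hp' heq
    by_contra hne
    have hsymm : Symmetric (fun p q : Int × List (String × String) => p.1 ≠ q.1) :=
      fun a b h => h.symm
    exact (List.Pairwise.forall hsymm (hpe.imp (fun h => ne_of_lt h))) hp hp' hne heq
  -- the A side
  have hA : normalize_git_items_py items =
      ((PySem.List.sorted items (fun x => pvCount x) true).foldl pvStepA
        (PySem.Set.empty, [])).2 := rfl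
  have hsorted : PySem.List.sorted items (fun x => pvCount x) true = s.map (fun p => p.2) := by
    conv_lhs => rw [← PySem.List.map_snd_enumerate items 0, pv_sorted_map]
    rfl
  have hAsel : normalize_git_items_py items = sel.map (fun p => pvOut p.2) := by
    rw [hA, hsorted, pv_foldA, pv_sel_map, List.nil_append, List.map_map]
    rfl
  -- the dict
  have hbn : bestd.keys.Nodup := pv_foldl_nodup e PySem.Dict.empty (by simp)
  have hget0 : bestd.get? "" = none := by
    rw [hbest, pv_foldl_get?_empty, PySem.Dict.get?_empty]
  have hget : ∀ k, k ≠ "" → bestd.get? k =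
      e.foldl (fun o p => if pvKey p.2 = k then pvUpd o p else o) none := by
    intro k hk
    rw [hbest, pv_foldl_get? e PySem.Dict.empty k hk, PySem.Dict.get?_empty]
  have hspec : ∀ k, k ≠ "" →
      ((e.foldl (fun o p => if pvKey p.2 = k then pvUpd o p else o) none = none ∧
          ∀ p ∈ e, pvKey p.2 ≠ k) ∨
        ∃ p, pvIsRep e k p ∧
          e.foldl (fun o p => if pvKey p.2 = k then pvUpd o p else o) none = some (pvEmb p)) := by
    intro k _
    have := pv_selRep_spec e [] none k (by simpa using hpe) (Or.inl ⟨rfl, by simp⟩)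
    simpa using this
  have hmemv : ∀ v, v ∈ bestd.values ↔
      ∃ p, pvKey p.2 ≠ "" ∧ pvIsRep e (pvKey p.2) p ∧ v = pvEmb p := by
    intro v
    rw [pv_mem_values hbn]
    constructor
    · rintro ⟨k, hk⟩
      by_cases hk0 : k = ""
      · rw [hk0, hget0] at hk; cases hk
      · rw [hget k hk0] at hk
        rcases hspec k hk0 with ⟨hnone, _⟩ | ⟨p, hrep, heq⟩
        · rw [hnone] at hk; cases hk
        · rw [heq] at hk
          refine ⟨p, ?_, ?_, (Option.some.injEq _ _ ▸ hk).symm⟩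
          · rw [hrep.2.1]; exact hk0
          · rw [hrep.2.1]; exact hrep
    · rintro ⟨p, hkne, hrep, rfl⟩
      refine ⟨pvKey p.2, ?_⟩
      rw [hget _ hkne]
      rcases hspec (pvKey p.2) hkne with ⟨_, hall⟩ | ⟨p', hrep', heq⟩
      · exact absurd hrep.2.1 (hall p hrep.1)
      · rw [heq, pv_isRep_unique e (pvKey p.2) p' p hrep' hrep]
  have hkv : ∀ kv ∈ bestd.items, ∃ p, p ∈ e ∧ pvKey p.2 = kv.1 ∧ kv.2 = pvEmb p := by
    intro kv hkvm
    have hg : bestd.get? kv.1 = some kv.2 :=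
      PySem.Dict.get?_of_mem_items bestd (by simpa using hkvm) hbn
    by_cases h0 : kv.1 = ""
    · rw [h0, hget0] at hg; cases hg
    · rw [hget _ h0] at hg
      rcases hspec kv.1 h0 with ⟨hnone, _⟩ | ⟨p, hrep, heq⟩
      · rw [hnone] at hg; cases hg
      · rw [heq] at hg
        exact ⟨p, hrep.1, hrep.2.1, (Option.some.injEq _ _ ▸ hg).symm⟩
  have hval_idx : bestd.values.Pairwise (fun a b => a.2.1 ≠ b.2.1) := by
    have hkeys : bestd.items.Pairwise (fun a b => a.1 ≠ b.1) := by
      have h := hbn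
      show bestd.items.Pairwise _
      exact List.pairwise_map.mp h
    show (bestd.items.map (fun kv => kv.2)).Pairwise _
    rw [List.pairwise_map]
    refine List.Pairwise.imp_of_mem ?_ hkeys
    intro a b ha hb hne heq
    rcases hkv a ha with ⟨p, hpmem, hpk, hpv⟩
    rcases hkv b hb with ⟨q, hqmem, hqk, hqv⟩
    have hid : p.1 = q.1 := by
      have : (pvEmb p).2.1 = (pvEmb q).2.1 := by rw [← hpv, ← hqv]; exact heq
      simpa [pvEmb] using this
    have : p = q := hfst_inj p hpmem q hqmem hid
    exact hne (by rw [← hpk, ← hqk, this])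
  -- permutation between the dict's values and the selected representatives
  have hperm : bestd.values.Perm (sel.map pvEmb) := by
    have hnd1 : bestd.values.Nodup :=
      hval_idx.imp (fun h => fun he => h (by rw [he]))
    have hnd2 : (sel.map pvEmb).Nodup := by
      refine List.Nodup.of_map (fun t => t.2.1) ?_
      rw [List.map_map]
      exact hselfst
    rw [List.perm_ext_iff_of_nodup hnd1 hnd2]
    intro v
    rw [hmemv v, List.mem_map]
    constructor
    · rintro ⟨p, hkne, hrep, rfl⟩
      refine ⟨p, ?_, rfl⟩
      rw [hseldef, pv_selP_mem s PySem.Set.empty p hspw]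
      refine ⟨hsperm.mem_iff.mpr hrep.1, hkne, by simp [PySem.Set.empty], ?_⟩
      intro q hq hkq
      exact hrep.2.2 q (hsperm.mem_iff.mp hq) hkq
    · rintro ⟨p, hp, rfl⟩
      rw [hseldef, pv_selP_mem s PySem.Set.empty p hspw] at hp
      refine ⟨p, hp.2.1, ⟨hsperm.mem_iff.mp hp.1, rfl, ?_⟩, rfl⟩
      intro q hq hkq
      exact hp.2.2.2 q (hsperm.mem_iff.mpr hq) hkq
  -- the B side: the two stable sorts produce exactly the selected representatives
  have hsorteq : PySem.List.sorted (PySem.List.sorted bestd.values (fun t => t.2.1) false)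
      (fun t => t.1) true = sel.map pvEmb := by
    refine pv_eq_of_perm_pairwise (fun t => t.1) (fun t => t.2.1) _ _
      (((PySem.List.sorted_perm _ _ true).trans (PySem.List.sorted_perm _ _ false)).trans hperm)
      ?_ ?_
    · refine pv_sorted_rev_pairwise _ _ _ ?_
      have hle := PySem.List.sorted_pairwise bestd.values (fun t => t.2.1)
      have hne : (PySem.List.sorted bestd.values (fun t => t.2.1) false).Pairwise
          (fun a b => a.2.1 ≠ b.2.1) := by
        have : (PySem.List.sorted bestd.values (fun t => t.2.1) false).Perm bestd.values :=
          PySem.List.sorted_perm _ _ false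
        exact (this.pairwise_iff (fun h => h.symm)).mpr hval_idx
      exact (hle.and hne).imp (fun h => lt_of_le_of_ne h.1 h.2)
    · rw [List.pairwise_map]
      exact hsel_pw.imp (fun h => h)
  -- assemble
  have hB : normalize_git_items_py_alt items =
      (PySem.List.sorted (PySem.List.sorted bestd.values (fun t => t.2.1) false)
        (fun t => t.1) true).map (fun t => [("login", t.2.2.1), ("name", t.2.2.2)]) := rfl
  rw [hAsel, hB, hsorteq, List.map_map]
  rfl

-- ===== VERDICT (by name: the statement is the Claim_ definition above) =====
theorem normalize_git_items_py_spec : Claim_equal_normalize_git_items_py := by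
  intro items _ _
  show normalize_git_items_py items = normalize_git_items_py_alt items
  exact pv_main items
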